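-- pv_equiv track=rewrite | github.com/edawson/presig | presig/presig.py | detect_microhomology
-- ===== SOURCE A (Python) =====
-- GLOBAL_MAX_MH_LEN = 5
--
-- def detect_microhomology(ref_allele, alt_allele,
--                             reflen, altlen,
--                             ref_context_fiveprime, ref_context_threeprime):
--     mh = False
--     mh_len = 0
--     head_mh_seq = ""
--     tail_mh_seq = ""
--     head_mh_valid = True
--     tail_mh_valid = True
--     for i in range(1, 1 + GLOBAL_MAX_MH_LEN):
--         if reflen > altlen:
--             head_mh_seq = ref_allele[0:i]
--             tail_mh_seq = ref_allele[len(ref_allele) - i : len(ref_allele)]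
--         else:
--             head_mh_seq = alt_allele[0:i]
--             tail_mh_seq = alt_allele[len(alt_allele) - i : len(alt_allele)]
--         fiveprime_mh_seq = ref_context_fiveprime[len(ref_context_fiveprime) - i : len(ref_context_fiveprime)]
--         threeprime_mh_seq = ref_context_threeprime[0:i]
--         if tail_mh_seq == fiveprime_mh_seq:
--             # write_err("5\' symm:", tail_mh_seq, ";", "context:",
--             #     ref_context_fiveprime,
--             #     "ref:", ref_allele,
--             #     "alt:", alt_allele)
--             mlen = len(tail_mh_seq)
--             mh_len = max(mh_len, mlen)
--         if head_mh_seq == threeprime_mh_seq: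
--             mlen = len(head_mh_seq)
--             mh_len = max(mh_len, mlen)
--     if mh_len > 0:
--         mh = True
--
--     return mh, mh_len
-- ===== SOURCE B (Python) =====
-- GLOBAL_MAX_MH_LEN = 5
--
-- def _common(a, b):
--     n = 0
--     for x, y in zip(a, b):
--         if x != y or n == GLOBAL_MAX_MH_LEN:
--             break
--         n += 1
--     return n
--
-- def detect_microhomology(ref_allele, alt_allele,
--                             reflen, altlen,
--                             ref_context_fiveprime, ref_context_threeprime):
--     allele = ref_allele if reflen > altlen else alt_allele
--     head = _common(allele, ref_context_threeprime)
--     tail = _common(allele[::-1], ref_context_fiveprime[::-1])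
--     mh_len = max(head, tail)
--     return mh_len > 0, mh_len
-- ===== Notes on version B (the rewrite author's own statement) =====
-- stated objective: simpler
-- what changed: Replaces the 5-iteration loop that rebuilds and compares five prefix/suffix slice pairs with two single early-exit character scans: a common-prefix scan of the chosen allele against the 3' context and of the reversed allele against the reversed 5' context, each capped at 5.
import Mathlib
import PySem

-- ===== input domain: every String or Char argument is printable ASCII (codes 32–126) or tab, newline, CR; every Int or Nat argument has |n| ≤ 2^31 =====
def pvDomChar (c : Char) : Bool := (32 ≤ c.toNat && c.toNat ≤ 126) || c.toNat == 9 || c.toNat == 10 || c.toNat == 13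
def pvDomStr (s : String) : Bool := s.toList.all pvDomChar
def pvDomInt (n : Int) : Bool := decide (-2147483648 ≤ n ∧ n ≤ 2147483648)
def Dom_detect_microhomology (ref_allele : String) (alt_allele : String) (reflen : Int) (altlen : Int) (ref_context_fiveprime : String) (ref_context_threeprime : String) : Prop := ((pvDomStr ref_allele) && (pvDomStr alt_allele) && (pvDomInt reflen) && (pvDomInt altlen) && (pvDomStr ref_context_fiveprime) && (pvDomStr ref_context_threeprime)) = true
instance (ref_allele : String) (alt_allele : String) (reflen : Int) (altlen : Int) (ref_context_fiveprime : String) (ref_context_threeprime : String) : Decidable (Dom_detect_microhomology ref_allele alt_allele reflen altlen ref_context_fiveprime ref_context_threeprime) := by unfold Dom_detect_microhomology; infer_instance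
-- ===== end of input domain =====

-- B replaces A's five full slice re-comparisons with two single early-exit common-prefix
-- scans (allele vs 3' context, reversed allele vs reversed 5' context), capped at 5: simpler.

-- ===== PORT A =====
def detect_microhomology (ref_allele : String) (alt_allele : String) (reflen : Int) (altlen : Int) (ref_context_fiveprime : String) (ref_context_threeprime : String) : Bool × Int :=
  -- for i in range(1, 1 + GLOBAL_MAX_MH_LEN): …  (head_mh_seq/tail_mh_seq are rebuilt every
  -- iteration and unused after the loop, so only mh_len is threaded through the fold)
  let mh_len : Int :=
    (PySem.List.pyRange 1 (1 + 5) 1).foldl (fun mh_len i =>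
      let head_mh_seq : String :=
        if reflen > altlen then PySem.Str.slice ref_allele (some 0) (some i)
        else PySem.Str.slice alt_allele (some 0) (some i)
      let tail_mh_seq : String :=
        if reflen > altlen then
          PySem.Str.slice ref_allele (some (PySem.Str.len ref_allele - i)) (some (PySem.Str.len ref_allele))
        else
          PySem.Str.slice alt_allele (some (PySem.Str.len alt_allele - i)) (some (PySem.Str.len alt_allele))
      let fiveprime_mh_seq : String :=
        PySem.Str.slice ref_context_fiveprime (some (PySem.Str.len ref_context_fiveprime - i)) (some (PySem.Str.len ref_context_fiveprime))
      let threeprime_mh_seq : String := PySem.Str.slice ref_context_threeprime (some 0) (some i)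
      let mh_len := if tail_mh_seq = fiveprime_mh_seq then max mh_len (PySem.Str.len tail_mh_seq) else mh_len
      let mh_len := if head_mh_seq = threeprime_mh_seq then max mh_len (PySem.Str.len head_mh_seq) else mh_len
      mh_len) 0
  (decide (mh_len > 0), mh_len)

-- ===== PORT B =====
-- def _common(a, b): early-exit scan over zip(a, b), capped at GLOBAL_MAX_MH_LEN = 5
def pvCommon : List (Char × Char) → Int → Int
  | [], n => n
  | (x, y) :: rest, n => if x ≠ y ∨ n = 5 then n else pvCommon rest (n + 1)

def detect_microhomology_alt (ref_allele : String) (alt_allele : String) (reflen : Int) (altlen : Int) (ref_context_fiveprime : String) (ref_context_threeprime : String) : Bool × Int :=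
  let allele := if reflen > altlen then ref_allele else alt_allele
  let head := pvCommon (allele.toList.zip ref_context_threeprime.toList) 0
  -- allele[::-1] / context[::-1] are list reversals (PySem.Str.slice?_none_none_neg_one)
  let tail := pvCommon (allele.toList.reverse.zip ref_context_fiveprime.toList.reverse) 0
  let mh_len := max head tail
  (decide (mh_len > 0), mh_len)

-- ===== PRECONDITION & SPEC =====
def Spec_detect_microhomology (ref_allele : String) (alt_allele : String) (reflen : Int) (altlen : Int) (ref_context_fiveprime : String) (ref_context_threeprime : String) (out : Bool × Int) : Prop := out = detect_microhomology_alt ref_allele alt_allele reflen altlen ref_context_fiveprime ref_context_threeprime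
instance (ref_allele : String) (alt_allele : String) (reflen : Int) (altlen : Int) (ref_context_fiveprime : String) (ref_context_threeprime : String) (out : Bool × Int) : Decidable (Spec_detect_microhomology ref_allele alt_allele reflen altlen ref_context_fiveprime ref_context_threeprime out) := by unfold Spec_detect_microhomology; infer_instance

-- ===== CLAIM (what is proved, stated in full; the proofs are below) =====
def Claim_equal_detect_microhomology : Prop := ∀ (ref_allele : String) (alt_allele : String) (reflen : Int) (altlen : Int) (ref_context_fiveprime : String) (ref_context_threeprime : String), Dom_detect_microhomology ref_allele alt_allele reflen altlen ref_context_fiveprime ref_context_threeprime → Spec_detect_microhomology ref_allele alt_allele reflen altlen ref_context_fiveprime ref_context_threeprime (detect_microhomology ref_allele alt_allele reflen altlen ref_context_fiveprime ref_context_threeprime)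

-- ===== LEMMAS AND PROOFS =====

-- longest-common-prefix length of two character lists
def lcp : List Char → List Char → Nat
  | x :: xs, y :: ys => if x = y then lcp xs ys + 1 else 0
  | _, _ => 0

lemma lcp_le_left : ∀ (a b : List Char), lcp a b ≤ a.length
  | [], _ => by simp [lcp]
  | _ :: _, [] => by simp [lcp]
  | x :: xs, y :: ys => by
    by_cases h : x = y <;> simp [lcp, h]
    exact lcp_le_left xs ys

lemma lcp_le_right : ∀ (a b : List Char), lcp a b ≤ b.length
  | [], _ => by simp [lcp]
  | _ :: _, [] => by simp [lcp]
  | x :: xs, y :: ys => by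
    by_cases h : x = y <;> simp [lcp, h]
    exact lcp_le_right xs ys

-- take i c = take j t, characterised arithmetically through lcp
lemma take_nil_iff (t : List Char) (j : Nat) : t.take j = [] ↔ min j t.length = 0 := by
  rw [List.take_eq_nil_iff]
  constructor
  · rintro (h | h) <;> simp [h]
  · intro h
    rcases t with - | ⟨y, ys⟩
    · right; rfl
    · left; simp at h; omega

lemma take_eq_take_iff : ∀ (c t : List Char) (i j : Nat),
    (c.take i = t.take j) ↔ (min i c.length = min j t.length ∧ min i c.length ≤ lcp c t)
  | [], t, i, j => by
    rw [List.take_nil, eq_comm, take_nil_iff]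
    have hl : lcp [] t = 0 := by cases t <;> rfl
    simp only [hl, List.length_nil]
    omega
  | c :: cs, t, 0, j => by
    rw [List.take_zero, eq_comm, take_nil_iff]
    have hl : lcp (c :: cs) t ≤ t.length := lcp_le_right _ _
    constructor
    · intro h; constructor <;> omega
    · rintro ⟨h1, -⟩; omega
  | c :: cs, [], i + 1, j => by
    constructor
    · intro h; simp at h
    · rintro ⟨h1, -⟩
      simp only [List.length_cons, List.length_nil] at h1
      omega
  | c :: cs, t :: ts, i + 1, 0 => by
    constructor
    · intro h; simp at h
    · rintro ⟨h1, -⟩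
      simp only [List.length_cons] at h1
      omega
  | c :: cs, t :: ts, i + 1, j + 1 => by
    have hl : lcp (c :: cs) (t :: ts) = if c = t then lcp cs ts + 1 else 0 := rfl
    by_cases h : c = t
    · rw [hl, if_pos h]
      simp only [List.take_succ_cons, List.cons.injEq, List.length_cons, h, true_and]
      rw [take_eq_take_iff cs ts i j]
      omega
    · rw [hl, if_neg h]
      constructor
      · rintro h'
        simp only [List.take_succ_cons, List.cons.injEq] at h'
        exact absurd h'.1 h
      · rintro ⟨-, h2⟩
        simp only [List.length_cons] at h2
        omega

-- B's scan computes min 5 (n + lcp)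
lemma common_eq : ∀ (a b : List Char) (n : Nat), n ≤ 5 →
    pvCommon (a.zip b) (n : Int) = ((min 5 (n + lcp a b) : Nat) : Int)
  | [], b, n, hn => by
    have hl : lcp [] b = 0 := by cases b <;> rfl
    simp [pvCommon, hl]
    omega
  | a :: as, [], n, hn => by
    simp [pvCommon, lcp]
    omega
  | a :: as, b :: bs, n, hn => by
    have hl : lcp (a :: as) (b :: bs) = if a = b then lcp as bs + 1 else 0 := rfl
    simp only [List.zip_cons_cons, pvCommon, hl]
    by_cases hab : a = b
    · by_cases h5 : n = 5
      · subst h5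
        rw [if_pos (show a ≠ b ∨ ((5 : Nat) : Int) = 5 from Or.inr (by norm_num)), if_pos hab]
        omega
      · rw [if_neg (by simp [hab]; exact_mod_cast h5), if_pos hab]
        have hc : ((n : Int) + 1) = ((n + 1 : Nat) : Int) := by push_cast; ring
        rw [hc, common_eq as bs (n + 1) (by omega)]
        congr 1
        omega
    · rw [if_pos (Or.inl hab), if_neg hab]
      omega

-- length of the suffix A's tail slice s[len-i:len] actually produces (negative starts clamp)
def tlen (n k : Nat) : Nat := if k ≤ n then k else if k ≤ 2 * n then k - n else n

lemma tlen_le_left (n k : Nat) : tlen n k ≤ n := by unfold tlen; split_ifs <;> omega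
lemma tlen_le_right (n k : Nat) : tlen n k ≤ k := by unfold tlen; split_ifs <;> omega
lemma tlen_of_le {n k : Nat} (h : k ≤ n) : tlen n k = k := by unfold tlen; rw [if_pos h]

lemma tail_slice_eq (c : List Char) (k : Nat) :
    PySem.List.slice c (some ((c.length : Int) - (k : Int))) (some (c.length : Int))
      = c.drop (c.length - tlen c.length k) := by
  simp only [PySem.List.slice, PySem.List.clampIdx]
  have hb : ¬ ((c.length : Int) < 0) := by omega
  rw [if_neg hb]
  have hbn : min (c.length : Int).toNat c.length = c.length := by omega
  rw [hbn]
  by_cases h1 : (c.length : Int) - k < 0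
  · rw [if_pos h1]
    by_cases h2 : (c.length : Int) + ((c.length : Int) - k) < 0
    · rw [if_pos h2]
      have : tlen c.length k = c.length := by unfold tlen; split_ifs <;> omega
      rw [this]
      simp [List.take_of_length_le]
    · rw [if_neg h2]
      have ha : ((c.length : Int) + ((c.length : Int) - k)).toNat = c.length - tlen c.length k := by
        unfold tlen; split_ifs <;> omega
      rw [ha]
      exact List.take_of_length_le (by simp only [List.length_drop]; omega)
  · rw [if_neg h1]
    have ha : min ((c.length : Int) - k).toNat c.length = c.length - tlen c.length k := by
      unfold tlen; split_ifs <;> omega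
    rw [ha]
    exact List.take_of_length_le (by simp only [List.length_drop]; omega)

lemma drop_eq_drop_iff (c f : List Char) (k1 k2 : Nat) (h1 : k1 ≤ c.length) (h2 : k2 ≤ f.length) :
    (c.drop (c.length - k1) = f.drop (f.length - k2))
      ↔ (k1 = k2 ∧ k1 ≤ lcp c.reverse f.reverse) := by
  rw [← List.reverse_inj, List.reverse_drop, List.reverse_drop]
  have e1 : c.length - (c.length - k1) = k1 := by omega
  have e2 : f.length - (f.length - k2) = k2 := by omega
  rw [e1, e2, take_eq_take_iff]
  simp only [List.length_reverse]
  omega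

-- contribution of iteration i of A's loop, head and tail comparisons
def hval (c t : List Char) (k : Nat) : Int :=
  if min k c.length = min k t.length ∧ min k c.length ≤ lcp c t then (min k c.length : Int) else 0

def tval (c f : List Char) (k : Nat) : Int :=
  if tlen c.length k = tlen f.length k ∧ tlen c.length k ≤ lcp c.reverse f.reverse
  then (tlen c.length k : Int) else 0

lemma hval_le (c t : List Char) (k : Nat) (hk : k ≤ 5) :
    hval c t k ≤ ((min 5 (lcp c t) : Nat) : Int) := by
  unfold hval; split_ifs with h
  · omega
  · omega

lemma tval_le (c f : List Char) (k : Nat) (hk : k ≤ 5) :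
    tval c f k ≤ ((min 5 (lcp c.reverse f.reverse) : Nat) : Int) := by
  have := tlen_le_right c.length k
  unfold tval; split_ifs with h
  · omega
  · omega

lemma hval_attain (c t : List Char) :
    hval c t (min 5 (lcp c t)) = ((min 5 (lcp c t) : Nat) : Int) := by
  have h1 := lcp_le_left c t
  have h2 := lcp_le_right c t
  unfold hval
  rw [if_pos (by omega)]
  omega

lemma tval_attain (c f : List Char) :
    tval c f (min 5 (lcp c.reverse f.reverse)) = ((min 5 (lcp c.reverse f.reverse) : Nat) : Int) := by
  have h1 := lcp_le_left c.reverse f.reverse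
  have h2 := lcp_le_right c.reverse f.reverse
  simp only [List.length_reverse] at h1 h2
  unfold tval
  rw [tlen_of_le (by omega), tlen_of_le (by omega), if_pos (by omega)]

-- equality of A's two tail slices, with tlen substituted for both drops
lemma tail_eq_tail_iff (c f : List Char) (k : Nat) :
    (c.drop (c.length - tlen c.length k) = f.drop (f.length - tlen f.length k))
      ↔ (tlen c.length k = tlen f.length k ∧ tlen c.length k ≤ lcp c.reverse f.reverse) :=
  drop_eq_drop_iff c f _ _ (tlen_le_left _ _) (tlen_le_left _ _)

-- one iteration of A's loop, rewritten to max m (max tval hval)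
lemma step_eq (s fv th : String) (m i : Int) (k : Nat) (hik : i = (k : Int)) (hm : 0 ≤ m) :
    (if PySem.Str.slice s (some 0) (some i) = PySem.Str.slice th (some 0) (some i) then
        max
          (if PySem.Str.slice s (some (PySem.Str.len s - i)) (some (PySem.Str.len s)) =
              PySem.Str.slice fv (some (PySem.Str.len fv - i)) (some (PySem.Str.len fv)) then
            max m (PySem.Str.len (PySem.Str.slice s (some (PySem.Str.len s - i)) (some (PySem.Str.len s))))
          else m)
          (PySem.Str.len (PySem.Str.slice s (some 0) (some i)))
      else
        if PySem.Str.slice s (some (PySem.Str.len s - i)) (some (PySem.Str.len s)) =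
            PySem.Str.slice fv (some (PySem.Str.len fv - i)) (some (PySem.Str.len fv)) then
          max m (PySem.Str.len (PySem.Str.slice s (some (PySem.Str.len s - i)) (some (PySem.Str.len s))))
        else m)
      = max m (max (tval s.toList fv.toList k) (hval s.toList th.toList k)) := by
  subst hik
  simp only [String.ext_iff, PySem.Str.toList_slice, PySem.Chars.slice_eq_listSlice,
    PySem.Str.len_eq, PySem.List.slice_zero_start, PySem.List.slice_to_natCast,
    tail_slice_eq, tail_eq_tail_iff, take_eq_take_iff, List.length_take, List.length_drop]
  have t1 := tlen_le_left s.toList.length k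
  have t2 := tlen_le_left fv.toList.length k
  unfold tval hval
  split_ifs <;> omega

lemma chain_nonneg {w1 w2 w3 w4 w5 : Int} :
    (0 : Int) ≤ max (max (max (max (max 0 w1) w2) w3) w4) w5 := by
  simp only [le_max_iff]
  tauto

lemma le_chain {w1 w2 w3 w4 w5 x : Int}
    (h : x ≤ w1 ∨ x ≤ w2 ∨ x ≤ w3 ∨ x ≤ w4 ∨ x ≤ w5) :
    x ≤ max (max (max (max (max 0 w1) w2) w3) w4) w5 := by
  simp only [le_max_iff]
  tauto

-- A's whole loop, for a fixed chosen allele s, equals B's two capped scans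
lemma master (s fv th : String) :
    (PySem.List.pyRange 1 (1 + 5) 1).foldl (fun m i =>
      if PySem.Str.slice s (some 0) (some i) = PySem.Str.slice th (some 0) (some i) then
        max
          (if PySem.Str.slice s (some (PySem.Str.len s - i)) (some (PySem.Str.len s)) =
              PySem.Str.slice fv (some (PySem.Str.len fv - i)) (some (PySem.Str.len fv)) then
            max m (PySem.Str.len (PySem.Str.slice s (some (PySem.Str.len s - i)) (some (PySem.Str.len s))))
          else m)
          (PySem.Str.len (PySem.Str.slice s (some 0) (some i)))
      else
        if PySem.Str.slice s (some (PySem.Str.len s - i)) (some (PySem.Str.len s)) =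
            PySem.Str.slice fv (some (PySem.Str.len fv - i)) (some (PySem.Str.len fv)) then
          max m (PySem.Str.len (PySem.Str.slice s (some (PySem.Str.len s - i)) (some (PySem.Str.len s))))
        else m) 0
    = max (pvCommon (s.toList.zip th.toList) 0)
        (pvCommon (s.toList.reverse.zip fv.toList.reverse) 0) := by
  have hr : PySem.List.pyRange 1 (1 + 5) 1 = [1, 2, 3, 4, 5] := by decide
  rw [hr]
  simp only [List.foldl_cons, List.foldl_nil]
  rw [step_eq s fv th 0 1 1 (by norm_num) (by norm_num)]
  rw [step_eq s fv th _ 2 2 (by norm_num) (by positivity)]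
  rw [step_eq s fv th _ 3 3 (by norm_num) (by positivity)]
  rw [step_eq s fv th _ 4 4 (by norm_num) (by positivity)]
  rw [step_eq s fv th _ 5 5 (by norm_num) (by positivity)]
  have hB1 : pvCommon (s.toList.zip th.toList) 0
      = ((min 5 (lcp s.toList th.toList) : Nat) : Int) := by
    simpa using common_eq s.toList th.toList 0 (by norm_num)
  have hB2 : pvCommon (s.toList.reverse.zip fv.toList.reverse) 0
      = ((min 5 (lcp s.toList.reverse fv.toList.reverse) : Nat) : Int) := by
    simpa using common_eq s.toList.reverse fv.toList.reverse 0 (by norm_num)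
  rw [hB1, hB2]
  apply le_antisymm
  · have hw : ∀ k : Nat, k ≤ 5 →
        max (tval s.toList fv.toList k) (hval s.toList th.toList k)
          ≤ max ((min 5 (lcp s.toList th.toList) : Nat) : Int)
              ((min 5 (lcp s.toList.reverse fv.toList.reverse) : Nat) : Int) := by
      intro k hk
      exact max_le (le_trans (tval_le _ _ _ hk) (le_max_right _ _))
        (le_trans (hval_le _ _ _ hk) (le_max_left _ _))
    refine max_le (max_le (max_le (max_le (max_le (by positivity) ?_) ?_) ?_) ?_) ?_
    · exact hw 1 (by norm_num)
    · exact hw 2 (by norm_num)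
    · exact hw 3 (by norm_num)
    · exact hw 4 (by norm_num)
    · exact hw 5 (by norm_num)
  · apply max_le
    · have h := hval_attain s.toList th.toList
      have hb : min 5 (lcp s.toList th.toList) ≤ 5 := by omega
      rcases Nat.lt_or_ge (min 5 (lcp s.toList th.toList)) 1 with h0 | h1
      · have hz : min 5 (lcp s.toList th.toList) = 0 := by omega
        rw [hz]
        simp only [Nat.cast_zero]
        exact chain_nonneg
      · set a := min 5 (lcp s.toList th.toList) with ha
        clear_value a
        have hstep : ∀ w : Int, hval s.toList th.toList a ≤ w → (a : Int) ≤ w :=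
          fun w hw => le_trans (le_of_eq h.symm) hw
        interval_cases a
        · exact le_chain (Or.inl (hstep _ (le_max_right _ _)))
        · exact le_chain (Or.inr (Or.inl (hstep _ (le_max_right _ _))))
        · exact le_chain (Or.inr (Or.inr (Or.inl (hstep _ (le_max_right _ _)))))
        · exact le_chain (Or.inr (Or.inr (Or.inr (Or.inl (hstep _ (le_max_right _ _))))))
        · exact le_chain (Or.inr (Or.inr (Or.inr (Or.inr (hstep _ (le_max_right _ _))))))
    · have h := tval_attain s.toList fv.toList
      have hb : min 5 (lcp s.toList.reverse fv.toList.reverse) ≤ 5 := by omega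
      rcases Nat.lt_or_ge (min 5 (lcp s.toList.reverse fv.toList.reverse)) 1 with h0 | h1
      · have hz : min 5 (lcp s.toList.reverse fv.toList.reverse) = 0 := by omega
        rw [hz]
        simp only [Nat.cast_zero]
        exact chain_nonneg
      · set a := min 5 (lcp s.toList.reverse fv.toList.reverse) with ha
        clear_value a
        have hstep : ∀ w : Int, tval s.toList fv.toList a ≤ w → (a : Int) ≤ w :=
          fun w hw => le_trans (le_of_eq h.symm) hw
        interval_cases a
        · exact le_chain (Or.inl (hstep _ (le_max_left _ _)))
        · exact le_chain (Or.inr (Or.inl (hstep _ (le_max_left _ _))))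
        · exact le_chain (Or.inr (Or.inr (Or.inl (hstep _ (le_max_left _ _)))))
        · exact le_chain (Or.inr (Or.inr (Or.inr (Or.inl (hstep _ (le_max_left _ _))))))
        · exact le_chain (Or.inr (Or.inr (Or.inr (Or.inr (hstep _ (le_max_left _ _))))))

theorem detect_microhomology_spec : Claim_equal_detect_microhomology := by
  intro ref_allele alt_allele reflen altlen ref_context_fiveprime ref_context_threeprime _
  unfold Spec_detect_microhomology
  by_cases h : reflen > altlen
  · simp only [detect_microhomology, detect_microhomology_alt, if_pos h]
    rw [master ref_allele ref_context_fiveprime ref_context_threeprime]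
  · simp only [detect_microhomology, detect_microhomology_alt, if_neg h]
    rw [master alt_allele ref_context_fiveprime ref_context_threeprime]
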